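-- pv_equiv track=rewrite | github.com/guohongbin-git/topprism_chatopt | src/topprism_chatopt/llm_generator.py | generate_fallback_code
-- ===== SOURCE A (Python) =====
-- from typing import List
--
-- def generate_fallback_code(rules: List[str], context_items: list) -> str:
--     """
--     当LLM不可用时的备用代码生成方法
--     """
--     code_lines = []
--
--     for rule, context_item in zip(rules, context_items):
--         if not context_item:
--             continue
--
--         intent = context_item.get("intent", "")
--         template = context_item.get("or_tools_template", "")
--
--         if intent == "limit_visit_count":
--             # 默认每个销售最多拜访4个客户
--             code_lines.append("# 每个销售最多拜访4个客户")
--             code_lines.append("routing.AddConstantDimension(1, 4, True, 'VisitCount')")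
--         elif intent == "service_time_window":
--             code_lines.append("# 时间窗口约束")
--             code_lines.append("# 基于客户数据中的时间窗口")
--         elif intent == "maximize_priority":
--             code_lines.append("# 优先安排高价值客户")
--             code_lines.append("# 通过设置不同的惩罚值来实现优先级")
--
--     return "\n".join(code_lines) if code_lines else "# 无约束条件"
-- ===== SOURCE B (Python) =====
-- _SNIPPETS = {
--     "limit_visit_count": [
--         "# 每个销售最多拜访4个客户",
--         "routing.AddConstantDimension(1, 4, True, 'VisitCount')",
--     ],
--     "service_time_window": [
--         "# 时间窗口约束",
--         "# 基于客户数据中的时间窗口",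
--     ],
--     "maximize_priority": [
--         "# 优先安排高价值客户",
--         "# 通过设置不同的惩罚值来实现优先级",
--     ],
-- }
--
--
-- def generate_fallback_code(rules, context_items):
--     def lines(items):
--         # recursion over the truncated item list, building the output back-to-front
--         if not items:
--             return []
--         head, rest = items[0], items[1:]
--         tail = lines(rest)
--         if not head:
--             return tail
--         return _SNIPPETS.get(head.get("intent", ""), []) + tail
--
--     code_lines = lines(context_items[:len(rules)])
--     return "\n".join(code_lines) if code_lines else "# 无约束条件"
-- ===== Notes on version B (the rewrite author's own statement) =====
-- stated objective: alternative
-- what changed: Replaces the imperative zip loop with an if/elif appending to an accumulator by a recursion over the rules-length-truncated item list that prepends each item's snippet (from a static intent->lines table) to the recursively built tail, dropping zip and the accumulator entirely.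
import Mathlib
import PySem

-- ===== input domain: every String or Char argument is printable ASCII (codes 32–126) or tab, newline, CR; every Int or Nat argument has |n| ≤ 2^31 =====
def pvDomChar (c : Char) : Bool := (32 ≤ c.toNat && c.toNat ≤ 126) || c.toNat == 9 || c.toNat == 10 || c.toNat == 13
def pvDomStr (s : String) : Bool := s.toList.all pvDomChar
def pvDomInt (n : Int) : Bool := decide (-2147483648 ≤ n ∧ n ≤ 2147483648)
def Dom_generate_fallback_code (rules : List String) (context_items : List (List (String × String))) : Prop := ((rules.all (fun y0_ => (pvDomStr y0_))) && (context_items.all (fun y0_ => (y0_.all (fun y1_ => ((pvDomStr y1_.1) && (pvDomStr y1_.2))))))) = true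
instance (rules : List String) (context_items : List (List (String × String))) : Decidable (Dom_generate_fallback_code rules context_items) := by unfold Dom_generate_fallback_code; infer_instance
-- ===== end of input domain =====

-- B replaces A's zip loop + if/elif accumulator by a recursion over the truncated item list that
-- prepends static table snippets to the tail (alternative decomposition; same cost).


-- ===== PORT A =====
def generate_fallback_code (rules : List String) (context_items : List (List (String × String))) : String :=
  let code_lines : List String :=
    (rules.zip context_items).foldl (fun acc rc =>
      let context_item := rc.2
      if context_item = [] then acc
      else
        let intent := (PySem.Dict.mk context_item).getD "intent" ""
        let _template := (PySem.Dict.mk context_item).getD "or_tools_template" ""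
        if intent = "limit_visit_count" then
          acc ++ ["# 每个销售最多拜访4个客户", "routing.AddConstantDimension(1, 4, True, 'VisitCount')"]
        else if intent = "service_time_window" then
          acc ++ ["# 时间窗口约束", "# 基于客户数据中的时间窗口"]
        else if intent = "maximize_priority" then
          acc ++ ["# 优先安排高价值客户", "# 通过设置不同的惩罚值来实现优先级"]
        else acc) []
  if code_lines ≠ [] then PySem.Str.join "\n" code_lines else "# 无约束条件"

-- ===== PORT B =====
-- static intent → snippet-lines table
def pvSnippets : PySem.Dict String (List String) :=
  PySem.Dict.mk
    [("limit_visit_count", ["# 每个销售最多拜访4个客户", "routing.AddConstantDimension(1, 4, True, 'VisitCount')"]),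
     ("service_time_window", ["# 时间窗口约束", "# 基于客户数据中的时间窗口"]),
     ("maximize_priority", ["# 优先安排高价值客户", "# 通过设置不同的惩罚值来实现优先级"])]

-- recursion over the item list, building the output back-to-front
def pvLines : List (List (String × String)) → List String
  | [] => []
  | head :: rest =>
      let tail := pvLines rest
      if head = [] then tail
      else pvSnippets.getD ((PySem.Dict.mk head).getD "intent" "") [] ++ tail

def generate_fallback_code_alt (rules : List String) (context_items : List (List (String × String))) : String :=
  let code_lines := pvLines (context_items.take rules.length)
  if code_lines ≠ [] then PySem.Str.join "\n" code_lines else "# 无约束条件"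

-- ===== PRECONDITION & SPEC =====
def Spec_generate_fallback_code (rules : List String) (context_items : List (List (String × String))) (out : String) : Prop := out = generate_fallback_code_alt rules context_items
instance (rules : List String) (context_items : List (List (String × String))) (out : String) : Decidable (Spec_generate_fallback_code rules context_items out) := by unfold Spec_generate_fallback_code; infer_instance

-- ===== CLAIM (what is proved, stated in full; the proofs are below) =====
def Claim_equal_generate_fallback_code : Prop := ∀ (rules : List String) (context_items : List (List (String × String))), Dom_generate_fallback_code rules context_items → Spec_generate_fallback_code rules context_items (generate_fallback_code rules context_items)

-- ===== LEMMAS AND PROOFS =====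

-- the snippet chosen by A's if/elif chain is exactly B's table lookup
theorem pv_chain_eq_table (intent : String) :
    (if intent = "limit_visit_count" then
       ["# 每个销售最多拜访4个客户", "routing.AddConstantDimension(1, 4, True, 'VisitCount')"]
     else if intent = "service_time_window" then
       ["# 时间窗口约束", "# 基于客户数据中的时间窗口"]
     else if intent = "maximize_priority" then
       ["# 优先安排高价值客户", "# 通过设置不同的惩罚值来实现优先级"]
     else ([] : List String)) = pvSnippets.getD intent [] := by
  by_cases h1 : intent = "limit_visit_count"
  · simp [h1, pvSnippets, PySem.Dict.getD, PySem.Dict.get?]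
  · by_cases h2 : intent = "service_time_window"
    · simp [h2, pvSnippets, PySem.Dict.getD, PySem.Dict.get?]
    · by_cases h3 : intent = "maximize_priority"
      · simp [h3, pvSnippets, PySem.Dict.getD, PySem.Dict.get?]
      · simp [h1, h2, h3, pvSnippets, PySem.Dict.getD, PySem.Dict.get?, beq_iff_eq,
              Ne.symm h1, Ne.symm h2, Ne.symm h3]

-- A's left fold over the zip equals acc ++ B's back-to-front recursion over the truncated items
theorem pv_fold_eq_lines (rules : List String) (items : List (List (String × String))) (acc : List String) :
    (rules.zip items).foldl (fun acc rc =>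
      let context_item := rc.2
      if context_item = [] then acc
      else
        let intent := (PySem.Dict.mk context_item).getD "intent" ""
        let _template := (PySem.Dict.mk context_item).getD "or_tools_template" ""
        if intent = "limit_visit_count" then
          acc ++ ["# 每个销售最多拜访4个客户", "routing.AddConstantDimension(1, 4, True, 'VisitCount')"]
        else if intent = "service_time_window" then
          acc ++ ["# 时间窗口约束", "# 基于客户数据中的时间窗口"]
        else if intent = "maximize_priority" then
          acc ++ ["# 优先安排高价值客户", "# 通过设置不同的惩罚值来实现优先级"]
        else acc) acc
    = acc ++ pvLines (items.take rules.length) := by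
  induction rules generalizing items acc with
  | nil => simp [pvLines]
  | cons r rs ih =>
    cases items with
    | nil => simp [pvLines]
    | cons it its =>
      simp only [List.zip_cons_cons, List.foldl_cons, List.length_cons, List.take_succ_cons, pvLines]
      by_cases h : it = []
      · simpa [h] using ih its acc
      · rw [← pv_chain_eq_table ((PySem.Dict.mk it).getD "intent" "")]
        simp only [h]
        by_cases h1 : (PySem.Dict.mk it).getD "intent" "" = "limit_visit_count" <;>
          by_cases h2 : (PySem.Dict.mk it).getD "intent" "" = "service_time_window" <;>
            by_cases h3 : (PySem.Dict.mk it).getD "intent" "" = "maximize_priority" <;>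
              simp [h1, h2, h3, ih its]

-- ===== VERDICT (by name: the statement is the Claim_ definition above) =====
theorem generate_fallback_code_spec : Claim_equal_generate_fallback_code := by
  intro rules context_items _
  unfold Spec_generate_fallback_code generate_fallback_code generate_fallback_code_alt
  rw [pv_fold_eq_lines]
  simp
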